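-- pv_equiv track=rewrite | github.com/rkawkclzls/pyalgo-100 | 100/79.py | solution
-- ===== SOURCE A (Python) =====
-- def solution(data):
--     if len(data) < 4:
--         return 0  # 네 개 미만의 점으로는 사각형을 만들 수 없습니다.
--
--     # x 좌표와 y 좌표를 분리하여 리스트에 저장합니다.
--     x_coords = [point[0] for point in data]
--     y_coords = [point[1] for point in data]
--
--     # 최소 x, 최대 x, 최소 y, 최대 y를 찾습니다.
--     min_x = min(x_coords)
--     max_x = max(x_coords)
--     min_y = min(y_coords)
--     max_y = max(y_coords)
--
--     # 최대 넓이를 계산합니다.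
--     max_area = (max_x - min_x) * (max_y - min_y)
--     return max_area
-- ===== SOURCE B (Python) =====
-- def solution(data):
--     if len(data) < 4:
--         return 0
--     xs = sorted(point[0] for point in data)
--     ys = sorted(point[1] for point in data)
--     return (xs[-1] - xs[0]) * (ys[-1] - ys[0])
-- ===== Notes on version B (the rewrite author's own statement) =====
-- stated objective: alternative
-- what changed: Instead of scanning for the four extremes with min()/max(), B sorts the x-coordinates and the y-coordinates and reads the extremes off the endpoints of each sorted list.
import Mathlib
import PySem

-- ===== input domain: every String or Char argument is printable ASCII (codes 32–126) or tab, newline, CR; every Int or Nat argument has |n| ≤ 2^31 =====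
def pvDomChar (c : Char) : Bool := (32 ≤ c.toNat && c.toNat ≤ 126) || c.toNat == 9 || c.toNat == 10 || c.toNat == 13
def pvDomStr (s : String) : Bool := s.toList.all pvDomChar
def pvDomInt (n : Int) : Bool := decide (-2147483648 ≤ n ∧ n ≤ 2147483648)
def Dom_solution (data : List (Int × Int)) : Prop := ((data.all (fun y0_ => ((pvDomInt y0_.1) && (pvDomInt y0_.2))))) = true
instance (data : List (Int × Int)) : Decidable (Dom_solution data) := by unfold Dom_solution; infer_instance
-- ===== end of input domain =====

-- B replaces A's four min()/max() scans by sorting the x- and y-coordinate lists and reading the extremes off the sorted endpoints; same result, O(n log n) sorting instead of linear scans.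


-- ===== PORT A =====
def solution (data : List (Int × Int)) : Int :=
  if data.length < 4 then 0
  else
    let x_coords := data.map (fun point => point.1)
    let y_coords := data.map (fun point => point.2)
    -- min()/max() on a nonempty list never raise; the fallback 0 is unreachable (length ≥ 4)
    match PySem.List.min? x_coords (fun v => v), PySem.List.max? x_coords (fun v => v),
          PySem.List.min? y_coords (fun v => v), PySem.List.max? y_coords (fun v => v) with
    | some min_x, some max_x, some min_y, some max_y => (max_x - min_x) * (max_y - min_y)
    | _, _, _, _ => 0

-- ===== PORT B =====
def solution_alt (data : List (Int × Int)) : Int :=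
  if data.length < 4 then 0
  else
    let xs := PySem.List.sorted (data.map (fun point => point.1)) (fun v => v) false
    let ys := PySem.List.sorted (data.map (fun point => point.2)) (fun v => v) false
    -- xs[-1], xs[0], ys[-1], ys[0]; indexing a nonempty list never raises (length ≥ 4), so the default 0 is unreachable
    (PySem.List.pyGetD xs (-1) 0 - PySem.List.pyGetD xs 0 0) *
      (PySem.List.pyGetD ys (-1) 0 - PySem.List.pyGetD ys 0 0)

-- ===== PRECONDITION & SPEC =====
def Spec_solution (data : List (Int × Int)) (out : Int) : Prop := out = solution_alt data
instance (data : List (Int × Int)) (out : Int) : Decidable (Spec_solution data out) := by unfold Spec_solution; infer_instance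

-- ===== CLAIM (what is proved, stated in full; the proofs are below) =====
def Claim_equal_solution : Prop := ∀ (data : List (Int × Int)), Dom_solution data → Spec_solution data (solution data)

-- ===== LEMMAS AND PROOFS =====

-- head of the sorted list is min(l)
theorem sorted_headD_eq_min (l : List Int) (mn : Int)
    (hm : PySem.List.min? l (fun v => v) = some mn) :
    PySem.List.pyGetD (PySem.List.sorted l (fun v => v) false) 0 0 = mn := by
  have h : l ≠ [] := by
    intro he; subst he; simp [PySem.List.min?] at hm
  rcases hs : PySem.List.sorted l (fun v => v) false with _ | ⟨m, t⟩
  · exact absurd ((PySem.List.sorted_eq_nil_iff _ _ _).mp hs) h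
  have h1 : ∀ y ∈ l, m ≤ y := PySem.List.key_head_sorted_le l (fun v => v) hs
  have h2 : mn ∈ l := PySem.List.min?_mem hm
  have h3 : m ∈ l := by
    have hm' : m ∈ PySem.List.sorted l (fun v => v) false := by rw [hs]; exact List.mem_cons_self
    exact (PySem.List.mem_sorted _ _ _ _).mp hm'
  have h4 : mn ≤ m := PySem.List.min?_isMin hm m h3
  have : m = mn := le_antisymm (h1 mn h2) h4
  simp [PySem.List.pyGetD_zero_cons, this]

-- last of the sorted list is max(l)
theorem sorted_lastD_eq_max (l : List Int) (mx : Int)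
    (hm : PySem.List.max? l (fun v => v) = some mx) :
    PySem.List.pyGetD (PySem.List.sorted l (fun v => v) false) (-1) 0 = mx := by
  have h : l ≠ [] := by
    intro he; subst he; simp [PySem.List.max?] at hm
  have hsne : PySem.List.sorted l (fun v => v) false ≠ [] := by
    intro he; exact h ((PySem.List.sorted_eq_nil_iff _ _ _).mp he)
  set s := PySem.List.sorted l (fun v => v) false with hsdef
  have hlen : 0 < s.length := List.length_pos_iff.mpr hsne
  have hlast : s.getLast hsne = s[s.length - 1] := List.getLast_eq_getElem hsne
  have hlast_mem : s.getLast hsne ∈ l := (PySem.List.mem_sorted _ _ _ _).mp (List.getLast_mem hsne)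
  have h1 : s.getLast hsne ≤ mx := PySem.List.max?_isMax hm _ hlast_mem
  have hmx_mem : mx ∈ s := (PySem.List.mem_sorted _ _ _ _).mpr (PySem.List.max?_mem hm)
  obtain ⟨i, hi, hie⟩ := List.mem_iff_getElem.mp hmx_mem
  have h2 : mx ≤ s.getLast hsne := by
    rw [hlast, ← hie]
    exact PySem.List.sorted_id_getElem_mono l (by omega) (by rw [← hsdef]; omega)
  rw [PySem.List.pyGetD_neg_one s 0 hsne]
  exact le_antisymm h1 h2

-- ===== VERDICT (by name: the statement is the Claim_ definition above) =====
theorem solution_spec : Claim_equal_solution := by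
  intro data _
  unfold Spec_solution solution solution_alt
  by_cases h : data.length < 4
  · simp [h]
  · have hne : data ≠ [] := by intro he; subst he; simp at h
    have hx : data.map (fun point => point.1) ≠ [] := by simpa using hne
    have hy : data.map (fun point => point.2) ≠ [] := by simpa using hne
    simp only [h, if_false]
    rcases e1 : PySem.List.min? (data.map (fun point => point.1)) (fun v => v) with _ | mnx
    · exact absurd ((PySem.List.min?_eq_none_iff _ _).mp e1) hx
    rcases e2 : PySem.List.max? (data.map (fun point => point.1)) (fun v => v) with _ | mxx
    · exact absurd ((PySem.List.max?_eq_none_iff _ _).mp e2) hx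
    rcases e3 : PySem.List.min? (data.map (fun point => point.2)) (fun v => v) with _ | mny
    · exact absurd ((PySem.List.min?_eq_none_iff _ _).mp e3) hy
    rcases e4 : PySem.List.max? (data.map (fun point => point.2)) (fun v => v) with _ | mxy
    · exact absurd ((PySem.List.max?_eq_none_iff _ _).mp e4) hy
    rw [sorted_headD_eq_min _ _ e1, sorted_lastD_eq_max _ _ e2,
        sorted_headD_eq_min _ _ e3, sorted_lastD_eq_max _ _ e4]
    simp only [e1, e2, e3, e4]
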